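-- pv_equiv track=rewrite | github.com/shigeoka-dtc/git | company_name_change_checker.py | domain_score
-- ===== SOURCE A (Python) =====
-- DOMAIN_PRIORITY = [
--     ".co.jp", ".go.jp", ".or.jp",
--     "prtimes.jp", "news.yahoo.co.jp", "nikkei.com",
--     "businessinsider.jp", "itmedia.co.jp", "impress.co.jp",
--     "reuters.com", "asahi.com", "mainichi.jp", "yomiuri.co.jp",
--     "sankei.com", "jiji.com", "nhk.or.jp",
--     "irweb.jp", "release.tdnet.info",
--     "hatena.ne.jp", "note.com"
-- ]
--
-- LOW_QUALITY_DOMAINS = [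
--     "genspark.ai", "office-tsuda.net", "advisors-freee.jp", "freee.co.jp",
--     "bing.com/ck/a", "ai-con.lawyer", "shiodome.co.jp", "zeiri4.com", "bizocean.jp",
--     "corporate.ai-con.lawyer", "kaonavi.jp", "legal-script.com",
--     "hourei.net", "gyosei-shoshi.or.jp", "zeirishi-soudan.jp",
--     "biz.moneyforward.com", "corp.moneyforward.com",
--     "youtube.com", "twitter.com", "facebook.com", "instagram.com", "linkedin.com",
--     "ja.wikipedia.org", "dic.nicovideo.jp", "encyclopedia-biz.jp",
--     "smbiz.asahi.com", "biz.chosakai.or.jp",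
--     "jobtag.j-platpat.inpit.go.jp", "tatekae.jp", "sumabase.jp", "ciel-law.jp"
-- ]
--
-- def domain_score(url):
--     """URLに基づいてドメインスコアを計算する"""
--     url = url or ""
--     if any(domain in url for domain in LOW_QUALITY_DOMAINS):
--         return -100
--     for i, domain in enumerate(DOMAIN_PRIORITY):
--         if domain in url:
--             return len(DOMAIN_PRIORITY) - i
--     return 0
-- ===== SOURCE B (Python) =====
-- DOMAIN_PRIORITY = [
--     ".co.jp", ".go.jp", ".or.jp",
--     "prtimes.jp", "news.yahoo.co.jp", "nikkei.com",
--     "businessinsider.jp", "itmedia.co.jp", "impress.co.jp",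
--     "reuters.com", "asahi.com", "mainichi.jp", "yomiuri.co.jp",
--     "sankei.com", "jiji.com", "nhk.or.jp",
--     "irweb.jp", "release.tdnet.info",
--     "hatena.ne.jp", "note.com"
-- ]
--
-- LOW_QUALITY_DOMAINS = [
--     "genspark.ai", "office-tsuda.net", "advisors-freee.jp", "freee.co.jp",
--     "bing.com/ck/a", "ai-con.lawyer", "shiodome.co.jp", "zeiri4.com", "bizocean.jp",
--     "corporate.ai-con.lawyer", "kaonavi.jp", "legal-script.com",
--     "hourei.net", "gyosei-shoshi.or.jp", "zeirishi-soudan.jp",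
--     "biz.moneyforward.com", "corp.moneyforward.com",
--     "youtube.com", "twitter.com", "facebook.com", "instagram.com", "linkedin.com",
--     "ja.wikipedia.org", "dic.nicovideo.jp", "encyclopedia-biz.jp",
--     "smbiz.asahi.com", "biz.chosakai.or.jp",
--     "jobtag.j-platpat.inpit.go.jp", "tatekae.jp", "sumabase.jp", "ciel-law.jp"
-- ]
--
-- def domain_score(url):
--     """URLに基づいてドメインスコアを計算する"""
--     url = url or ""
--     if any(domain in url for domain in LOW_QUALITY_DOMAINS):
--         return -100
--     scores = [len(DOMAIN_PRIORITY) - i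
--               for i, domain in enumerate(DOMAIN_PRIORITY)
--               if domain in url]
--     return max(scores, default=0)
-- ===== Notes on version B (the rewrite author's own statement) =====
-- stated objective: alternative
-- what changed: The early-return scan over DOMAIN_PRIORITY is replaced by collecting a score for every matching domain and reducing with max(..., default=0); the earliest match equals the maximum because scores strictly decrease with index.
import Mathlib
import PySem

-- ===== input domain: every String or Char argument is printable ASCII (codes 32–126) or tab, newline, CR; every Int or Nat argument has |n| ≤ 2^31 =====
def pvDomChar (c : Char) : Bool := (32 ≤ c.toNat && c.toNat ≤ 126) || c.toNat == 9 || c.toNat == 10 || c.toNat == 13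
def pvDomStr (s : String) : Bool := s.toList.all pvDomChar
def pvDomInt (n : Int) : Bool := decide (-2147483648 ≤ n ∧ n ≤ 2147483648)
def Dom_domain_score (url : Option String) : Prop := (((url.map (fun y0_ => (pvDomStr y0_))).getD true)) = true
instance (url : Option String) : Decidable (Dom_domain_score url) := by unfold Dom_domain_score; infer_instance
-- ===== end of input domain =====

-- B replaces A's early-return priority scan by a max-reduction over all matching
-- domains' scores (objective: alternative decomposition, same cost).

-- shared module constants
def DOMAIN_PRIORITY : List String :=
  [".co.jp", ".go.jp", ".or.jp",
   "prtimes.jp", "news.yahoo.co.jp", "nikkei.com",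
   "businessinsider.jp", "itmedia.co.jp", "impress.co.jp",
   "reuters.com", "asahi.com", "mainichi.jp", "yomiuri.co.jp",
   "sankei.com", "jiji.com", "nhk.or.jp",
   "irweb.jp", "release.tdnet.info",
   "hatena.ne.jp", "note.com"]

def LOW_QUALITY_DOMAINS : List String :=
  ["genspark.ai", "office-tsuda.net", "advisors-freee.jp", "freee.co.jp",
   "bing.com/ck/a", "ai-con.lawyer", "shiodome.co.jp", "zeiri4.com", "bizocean.jp",
   "corporate.ai-con.lawyer", "kaonavi.jp", "legal-script.com",
   "hourei.net", "gyosei-shoshi.or.jp", "zeirishi-soudan.jp",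
   "biz.moneyforward.com", "corp.moneyforward.com",
   "youtube.com", "twitter.com", "facebook.com", "instagram.com", "linkedin.com",
   "ja.wikipedia.org", "dic.nicovideo.jp", "encyclopedia-biz.jp",
   "smbiz.asahi.com", "biz.chosakai.or.jp",
   "jobtag.j-platpat.inpit.go.jp", "tatekae.jp", "sumabase.jp", "ciel-law.jp"]

-- ===== PORT A =====
-- A's `for i, domain in enumerate(DOMAIN_PRIORITY): if domain in url: return len(...) - i`
def prioLoopA (u : String) : List (Int × String) → Int
  | [] => 0
  | (i, d) :: rest =>
      if PySem.Str.isIn d u then (DOMAIN_PRIORITY.length : Int) - i else prioLoopA u rest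

def domain_score (url : Option String) : Int :=
  let u := url.getD ""      -- `url = url or ""` (some "" is falsy and also becomes "")
  if LOW_QUALITY_DOMAINS.any (fun d => PySem.Str.isIn d u) then -100
  else prioLoopA u (PySem.List.enumerate DOMAIN_PRIORITY)

-- ===== PORT B =====
def domain_score_alt (url : Option String) : Int :=
  let u := url.getD ""      -- `url = url or ""`
  if LOW_QUALITY_DOMAINS.any (fun d => PySem.Str.isIn d u) then -100
  else
    let scores :=
      ((PySem.List.enumerate DOMAIN_PRIORITY).filter
        (fun p => PySem.Str.isIn p.2 u)).map
        (fun p => (DOMAIN_PRIORITY.length : Int) - p.1)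
    (PySem.List.max? scores (fun y => y)).getD 0   -- max(scores, default=0)

-- ===== PRECONDITION & SPEC =====
def Spec_domain_score (url : Option String) (out : Int) : Prop := out = domain_score_alt url
instance (url : Option String) (out : Int) : Decidable (Spec_domain_score url out) := by unfold Spec_domain_score; infer_instance

-- ===== CLAIM (what is proved, stated in full; the proofs are below) =====
def Claim_equal_domain_score : Prop := ∀ (url : Option String), Dom_domain_score url → Spec_domain_score url (domain_score url)

-- ===== LEMMAS AND PROOFS =====

theorem foldl_max_of_le {t : List Int} {a : Int} (h : ∀ y ∈ t, y ≤ a) :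
    t.foldl max a = a := by
  rcases PySem.List.foldl_max_mem t a with h1 | h1
  · exact h1
  · exact le_antisymm (h _ h1) (PySem.List.le_foldl_max t a).1

theorem firstMatch_eq_max (u : String) :
    ∀ (L : List (Int × String)), L.Pairwise (fun p q => p.1 < q.1) →
      prioLoopA u L =
        ((PySem.List.max?
          ((L.filter (fun p => PySem.Str.isIn p.2 u)).map
            (fun p => (DOMAIN_PRIORITY.length : Int) - p.1)) (fun y => y)).getD 0) := by
  intro L
  induction L with
  | nil => intro _; simp [prioLoopA, PySem.List.max?]
  | cons hd tl ih =>
    intro hp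
    rcases List.pairwise_cons.mp hp with ⟨hlt, htl⟩
    obtain ⟨i, d⟩ := hd
    by_cases hin : PySem.Str.isIn d u
    · simp only [prioLoopA, List.filter_cons, hin, if_pos, List.map_cons]
      rw [PySem.List.max?_id_cons]
      simp only [Option.getD_some]
      refine (foldl_max_of_le ?_).symm
      intro y hy
      rcases List.mem_map.mp hy with ⟨p, hpmem, rfl⟩
      have := hlt p (List.mem_of_mem_filter hpmem)
      omega
    · simp only [prioLoopA, hin, if_neg, List.filter_cons, Bool.false_eq_true,
        not_false_iff, ite_false]
      simpa [hin] using ih htl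

-- ===== VERDICT (by name: the statement is the Claim_ definition above) =====
theorem domain_score_spec : Claim_equal_domain_score := by
  intro url _
  unfold Spec_domain_score domain_score domain_score_alt
  by_cases h : LOW_QUALITY_DOMAINS.any (fun d => PySem.Str.isIn d (url.getD "")) = true
  · rw [if_pos h, if_pos h]
  · rw [if_neg h, if_neg h]
    exact firstMatch_eq_max (url.getD "") _
      (PySem.List.pairwise_lt_enumerate (xs := DOMAIN_PRIORITY) (s := 0))
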